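-- pv_equiv track=rewrite | github.com/CWE-ChatBot/CWE-ChatBot | apps/chatbot/src/session/session_security.py | _is_valid_session_id
-- ===== SOURCE A (Python) =====
-- def _is_valid_session_id(session_id: str) -> bool:
--     """Validate session ID format."""
--     if not session_id or not isinstance(session_id, str):
--         return False
--
--     # Basic validation - should be a reasonable length string
--     if len(session_id) < 8 or len(session_id) > 128:
--         return False
--
--     # Should not contain suspicious characters
--     suspicious_chars = ["<", ">", "&", "\"", "'", "\\", "/"]
--     if any(char in session_id for char in suspicious_chars):
--         return False
--
--     return True
-- ===== SOURCE B (Python) =====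
-- import re
--
-- _SESSION_ID_RE = re.compile(r"[^<>&\"'\\/]{8,128}\Z")
--
-- def _is_valid_session_id(session_id: str) -> bool:
--     """Validate session ID format via a single declarative pattern."""
--     if not session_id or not isinstance(session_id, str):
--         return False
--     return _SESSION_ID_RE.fullmatch(session_id) is not None
-- ===== Notes on version B (the rewrite author's own statement) =====
-- stated objective: idiomatic
-- what changed: Replaces the separate length bounds and the per-character suspicious-character scan with one precompiled regex fullmatch encoding both the 8-128 length bound and the forbidden-character class.
import Mathlib
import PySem

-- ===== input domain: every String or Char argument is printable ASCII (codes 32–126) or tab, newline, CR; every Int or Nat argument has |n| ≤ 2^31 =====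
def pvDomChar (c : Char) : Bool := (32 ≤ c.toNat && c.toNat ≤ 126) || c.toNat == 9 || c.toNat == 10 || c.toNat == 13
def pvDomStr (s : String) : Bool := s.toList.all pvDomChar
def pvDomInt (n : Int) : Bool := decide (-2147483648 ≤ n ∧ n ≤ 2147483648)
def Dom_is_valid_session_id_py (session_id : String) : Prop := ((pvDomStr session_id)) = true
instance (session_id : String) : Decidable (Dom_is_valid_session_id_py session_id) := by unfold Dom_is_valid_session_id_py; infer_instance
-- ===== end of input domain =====

-- B replaces A's separate length checks and suspicious-character scan with one declarative
-- full match (length bound + forbidden-character class); objective: idiomatic, same cost.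

-- ===== PORT A =====
def is_valid_session_id_py (session_id : String) : Bool :=
  let l := session_id.toList
  if l.length == 0 then false          -- `not session_id` (isinstance is always true here)
  else if l.length < 8 || l.length > 128 then false
  else if (['<', '>', '&', '"', '\'', '\\', '/'].map (fun c => [c])).any
            (fun ch => PySem.Chars.isIn ch l) then false   -- any(char in session_id ...)
  else true

-- ===== PORT B =====
-- re.fullmatch(r"[^<>&\"'\\/]{8,128}", s): ported exactly as "length in [8,128] and every
-- character outside the forbidden class" — the precise semantics of that pattern.
def is_valid_session_id_py_alt (session_id : String) : Bool :=
  let l := session_id.toList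
  if l.length == 0 then false          -- `not session_id` guard kept from Source B
  else decide (8 ≤ l.length) && decide (l.length ≤ 128)
       && l.all (fun c => !(['<', '>', '&', '"', '\'', '\\', '/'].contains c))

-- ===== PRECONDITION & SPEC =====
def Spec_is_valid_session_id_py (session_id : String) (out : Bool) : Prop := out = is_valid_session_id_py_alt session_id
instance (session_id : String) (out : Bool) : Decidable (Spec_is_valid_session_id_py session_id out) := by unfold Spec_is_valid_session_id_py; infer_instance

-- ===== CLAIM (what is proved, stated in full; the proofs are below) =====
def Claim_equal_is_valid_session_id_py : Prop := ∀ (session_id : String), Dom_is_valid_session_id_py session_id → Spec_is_valid_session_id_py session_id (is_valid_session_id_py session_id)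

-- ===== LEMMAS AND PROOFS =====

-- A's `char in session_id` on a one-character needle is plain membership.
theorem isIn_singleton (c : Char) (l : List Char) :
    PySem.Chars.isIn [c] l = l.contains c := by
  rcases h : PySem.Chars.isIn [c] l with _ | _
  · rw [PySem.Chars.isIn_eq_false_iff, List.singleton_infix_iff] at h
    simp [List.contains_eq_mem, h]
  · rw [PySem.Chars.isIn_iff_infix, List.singleton_infix_iff] at h
    simp [List.contains_eq_mem, h]

-- ===== VERDICT (by name: the statement is the Claim_ definition above) =====
theorem is_valid_session_id_py_spec : Claim_equal_is_valid_session_id_py := by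
  intro s _
  unfold Spec_is_valid_session_id_py is_valid_session_id_py is_valid_session_id_py_alt
  simp only [List.any_map, Function.comp_def, isIn_singleton]
  set l := s.toList with hl
  by_cases h0 : l.length = 0
  · simp [h0]
  · simp only [h0, beq_iff_eq]
    by_cases hlen : l.length < 8 ∨ l.length > 128
    · rcases hlen with hlen | hlen <;> simp [hlen, Nat.not_le_of_lt]
    · push Not at hlen
      by_cases hany : ∃ c ∈ l, c ∈ ['<', '>', '&', '"', '\'', '\\', '/']
      · obtain ⟨c, hc, hmem⟩ := hany
        have h1 : (['<', '>', '&', '"', '\'', '\\', '/'].any (fun c => l.contains c)) = true := by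
          simp only [List.any_eq_true]; exact ⟨c, hmem, by simpa [List.contains_eq_mem] using hc⟩
        have h2 : (l.all (fun c => !(['<', '>', '&', '"', '\'', '\\', '/'].contains c))) = false := by
          have hcon : (['<', '>', '&', '"', '\'', '\\', '/'].contains c) = true := by
            simpa [List.contains_eq_mem] using hmem
          simp only [List.all_eq_false]
          exact ⟨c, hc, by simp at hmem ⊢; tauto⟩
        have hlt : (decide (l.length < 8)) = false := decide_eq_false (by omega)
        have hgt : (decide (l.length > 128)) = false := decide_eq_false (by omega)
        simp only [h1, h2, hlt, hgt]; simp
      · push Not at hany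
        have h1 : (['<', '>', '&', '"', '\'', '\\', '/'].any (fun c => l.contains c)) = false := by
          simp only [List.any_eq_false]
          intro c hmem
          simp only [List.contains_eq_mem, decide_eq_true_eq]
          exact fun hc => hany c hc hmem
        have h2 : (l.all (fun c => !(['<', '>', '&', '"', '\'', '\\', '/'].contains c))) = true := by
          simp only [List.all_eq_true]
          intro c hc
          have hcon : (['<', '>', '&', '"', '\'', '\\', '/'].contains c) = false := by
            simpa [List.contains_eq_mem] using hany c hc
          have := hany c hc
          simp at this ⊢
          tauto
        have hlt : (decide (l.length < 8)) = false := decide_eq_false (by omega)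
        have hgt : (decide (l.length > 128)) = false := decide_eq_false (by omega)
        simp only [h1, h2, hlt, hgt]; simpa using hlen
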